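-- pv_equiv track=rewrite | github.com/wuyuqing0327/causal-toolkits-wyq | causal-toolkits-wyq/inference/roi/uplift_tree.py | group_uniqueCounts
-- ===== SOURCE A (Python) =====
-- def group_uniqueCounts(rows):
--     '''
--     Count sample size by experiment group.
--
--     Args
--     ----
--
--     rows : list of list
--            The internal data format.
--
--     Returns
--     -------
--     results : dictionary
--             The control and treatment sample size.
--     '''
--     results = {}
--     for row in rows:
--         r = row[-3]
--         y = row[-2]
--         c = row[-1]
--         if r not in results:
--             results[r] = [0, 0, 0]
--
--         results[r][0] += 1
--         results[r][1] += y
--         results[r][2] += c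
--
--     return results
-- ===== SOURCE B (Python) =====
-- def group_uniqueCounts(rows):
--     # Partition rows by group key first, then reduce each group in one pass.
--     groups = {}
--     for row in rows:
--         k = row[-3]
--         groups[k] = groups.get(k, []) + [row]
--     results = {}
--     for k, grp in groups.items():
--         results[k] = [len(grp), sum(r[-2] for r in grp), sum(r[-1] for r in grp)]
--     return results
-- ===== Notes on version B (the rewrite author's own statement) =====
-- stated objective: alternative
-- what changed: A fuses counting and both sums into one dict of mutable [n, sum_y, sum_c] triples updated per row; B first partitions the rows into a key->rows grouping dict and then reduces each group (len plus two sums) in a second pass.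
import Mathlib
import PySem

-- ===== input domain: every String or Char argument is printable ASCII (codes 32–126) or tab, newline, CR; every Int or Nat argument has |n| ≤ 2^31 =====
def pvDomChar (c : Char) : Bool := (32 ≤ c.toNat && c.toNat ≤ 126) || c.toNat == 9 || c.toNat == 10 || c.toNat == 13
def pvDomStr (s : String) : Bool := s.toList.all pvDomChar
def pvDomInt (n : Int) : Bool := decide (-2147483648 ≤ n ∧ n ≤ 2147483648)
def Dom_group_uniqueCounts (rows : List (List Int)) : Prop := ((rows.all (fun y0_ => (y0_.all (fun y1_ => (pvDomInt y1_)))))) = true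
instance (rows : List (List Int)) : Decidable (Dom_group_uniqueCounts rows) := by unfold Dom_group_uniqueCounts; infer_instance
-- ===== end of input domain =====

-- B is an alternative decomposition: partition the rows by key, then reduce each group;
-- A fuses everything into one accumulating dict of [count, sum_y, sum_c] triples.

-- ===== PORT A =====
def pvStepA (d : PySem.Dict Int (List Int)) (row : List Int) : PySem.Dict Int (List Int) :=
  let r := (PySem.List.pyGet? row (-3)).getD 0
  let y := (PySem.List.pyGet? row (-2)).getD 0
  let c := (PySem.List.pyGet? row (-1)).getD 0
  let d1 := if d.contains r then d else d.insert r [0, 0, 0]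
  let v0 := d1.getD r []
  let v1 := v0.set 0 (v0.getD 0 0 + 1)
  let v2 := v1.set 1 (v1.getD 1 0 + y)
  let v3 := v2.set 2 (v2.getD 2 0 + c)
  d1.insert r v3

def group_uniqueCounts (rows : List (List Int)) : List (Int × List Int) :=
  (rows.foldl pvStepA PySem.Dict.empty).items

-- ===== PORT B =====
def pvStepB (g : PySem.Dict Int (List (List Int))) (row : List Int) : PySem.Dict Int (List (List Int)) :=
  let k := (PySem.List.pyGet? row (-3)).getD 0
  g.insert k (g.getD k [] ++ [row])

def pvReduce (grp : List (List Int)) : List Int :=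
  [(grp.length : Int),
   (grp.map (fun r => (PySem.List.pyGet? r (-2)).getD 0)).sum,
   (grp.map (fun r => (PySem.List.pyGet? r (-1)).getD 0)).sum]

def group_uniqueCounts_alt (rows : List (List Int)) : List (Int × List Int) :=
  let groups := rows.foldl pvStepB PySem.Dict.empty
  (groups.items.foldl (fun d p => d.insert p.1 (pvReduce p.2)) PySem.Dict.empty).items

-- ===== PRECONDITION & SPEC =====
-- Pre_ excludes exactly the inputs where A raises IndexError (a row shorter than 3).
def Pre_group_uniqueCounts (rows : List (List Int)) : Prop := ∀ row ∈ rows, 3 ≤ row.length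
instance (rows : List (List Int)) : Decidable (Pre_group_uniqueCounts rows) := by unfold Pre_group_uniqueCounts; infer_instance
def pvWitness_group_uniqueCounts : List (List Int) := [[1, 2, 3], [5, 1, 4, 5], [7, 1, 0, 0]]

def Spec_group_uniqueCounts (rows : List (List Int)) (out : List (Int × List Int)) : Prop := out = group_uniqueCounts_alt rows
instance (rows : List (List Int)) (out : List (Int × List Int)) : Decidable (Spec_group_uniqueCounts rows out) := by unfold Spec_group_uniqueCounts; infer_instance

-- ===== CLAIM (what is proved, stated in full; the proofs are below) =====
def Claim_equal_group_uniqueCounts : Prop := ∀ (rows : List (List Int)), Dom_group_uniqueCounts rows → Pre_group_uniqueCounts rows → Spec_group_uniqueCounts rows (group_uniqueCounts rows)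

-- ===== LEMMAS AND PROOFS =====

def pvF (p : Int × List (List Int)) : Int × List Int := (p.1, pvReduce p.2)

def pvMapVal (g : PySem.Dict Int (List (List Int))) : PySem.Dict Int (List Int) :=
  PySem.Dict.mk (g.items.map pvF)

theorem mapVal_get? (g : PySem.Dict Int (List (List Int))) (k : Int) :
    (pvMapVal g).get? k = (g.get? k).map pvReduce := by
  obtain ⟨l⟩ := g
  induction l with
  | nil => rfl
  | cons p t ih =>
    show (PySem.Dict.mk (pvF p :: t.map pvF)).get? k = _
    rw [PySem.Dict.get?_mk_cons, PySem.Dict.get?_mk_cons]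
    by_cases h : p.1 == k
    · simp [pvF, h]
    · simp only [pvF, h]
      exact ih


theorem mapVal_contains (g : PySem.Dict Int (List (List Int))) (k : Int) :
    (pvMapVal g).contains k = g.contains k := by
  rw [PySem.Dict.contains_eq_isSome_get?, PySem.Dict.contains_eq_isSome_get?, mapVal_get?,
    Option.isSome_map]


theorem mapVal_insert (g : PySem.Dict Int (List (List Int))) (k : Int) (w : List (List Int)) :
    pvMapVal (g.insert k w) = (pvMapVal g).insert k (pvReduce w) := by
  apply PySem.Dict.ext
  show (g.insert k w).items.map pvF = ((pvMapVal g).insert k (pvReduce w)).items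
  rw [PySem.Dict.items_insert, PySem.Dict.items_insert, mapVal_contains]
  by_cases h : g.contains k
  · simp only [h, if_pos]
    show _ = (g.items.map pvF).map _
    rw [List.map_map, List.map_map]
    apply List.map_congr_left
    intro p _
    by_cases hp : p.1 = k <;> simp [pvF, hp]
  · simp only [h, Bool.false_eq_true, if_neg, not_false_iff]
    show _ = g.items.map pvF ++ _
    simp [pvF]
theorem step_comm (g : PySem.Dict Int (List (List Int))) (row : List Int) :
    pvStepA (pvMapVal g) row = pvMapVal (pvStepB g row) := by
  simp only [pvStepA, pvStepB]
  rw [mapVal_insert, mapVal_contains]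
  by_cases h : g.contains ((PySem.List.pyGet? row (-3)).getD 0)
  · have hs : (g.get? ((PySem.List.pyGet? row (-3)).getD 0)).isSome := by
      rw [← PySem.Dict.contains_eq_isSome_get?]; exact h
    obtain ⟨v, hv⟩ := Option.isSome_iff_exists.mp hs
    have hg : g.getD ((PySem.List.pyGet? row (-3)).getD 0) [] = v := by
      rw [PySem.Dict.getD_eq_get?_getD, hv]; rfl
    have hm : (pvMapVal g).getD ((PySem.List.pyGet? row (-3)).getD 0) [] = pvReduce v := by
      rw [PySem.Dict.getD_eq_get?_getD, mapVal_get?, hv]; rfl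
    simp only [h, if_pos, hm, hg]
    simp [pvReduce, List.set, List.getD]
  · have hnone : g.get? ((PySem.List.pyGet? row (-3)).getD 0) = none := by
      rw [← Option.not_isSome_iff_eq_none, ← PySem.Dict.contains_eq_isSome_get?]
      simp [h]
    have hg : g.getD ((PySem.List.pyGet? row (-3)).getD 0) [] = [] := by
      rw [PySem.Dict.getD_eq_get?_getD, hnone]; rfl
    simp only [h, Bool.false_eq_true, if_neg, not_false_iff, hg]
    rw [PySem.Dict.insert_insert_self]
    simp [PySem.Dict.getD_insert_self, pvReduce, List.set, List.getD]


theorem fold_comm (rows : List (List Int)) (g : PySem.Dict Int (List (List Int))) :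
    rows.foldl pvStepA (pvMapVal g) = pvMapVal (rows.foldl pvStepB g) := by
  induction rows generalizing g with
  | nil => rfl
  | cons row rest ih => simp only [List.foldl_cons, step_comm]; exact ih _

-- ===== VERDICT (by name: the statement is the Claim_ definition above) =====
theorem group_uniqueCounts_spec : Claim_equal_group_uniqueCounts := by
  intro rows _ _
  show group_uniqueCounts rows = group_uniqueCounts_alt rows
  unfold group_uniqueCounts group_uniqueCounts_alt
  have h1 : rows.foldl pvStepA PySem.Dict.empty = pvMapVal (rows.foldl pvStepB PySem.Dict.empty) := by
    have he : pvMapVal PySem.Dict.empty = PySem.Dict.empty := rfl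
    rw [← he, fold_comm]
  rw [h1]
  have hnd : ((rows.foldl pvStepB PySem.Dict.empty).items.map Prod.fst).Nodup := by
    have h := PySem.Dict.nodup_keys_foldl_insert_key rows
      (fun row => (PySem.List.pyGet? row (-3)).getD 0)
      (fun g row => g.getD ((PySem.List.pyGet? row (-3)).getD 0) [] ++ [row])
      PySem.Dict.empty PySem.Dict.nodup_keys_empty
    simpa [pvStepB, PySem.Dict.keys] using h
  show (pvMapVal (List.foldl pvStepB PySem.Dict.empty rows)).items =
    (List.foldl (fun d p => d.insert p.1 (pvReduce p.2)) PySem.Dict.empty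
      (List.foldl pvStepB PySem.Dict.empty rows).items).items
  rw [PySem.Dict.items_foldl_insert_fresh
    (rows.foldl pvStepB PySem.Dict.empty).items Prod.fst (fun p => pvReduce p.2)
    PySem.Dict.empty (fun a _ => PySem.Dict.contains_empty a.1) hnd]
  show List.map pvF (List.foldl pvStepB PySem.Dict.empty rows).items = _
  rw [show PySem.Dict.empty.items = ([] : List (Int × List Int)) from rfl, List.nil_append]
  rfl
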